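-- pv_equiv track=rewrite | github.com/peclarke/bitbingo | utils.py | _win_masks_for_n
-- ===== SOURCE A (Python) =====
-- from typing import Tuple
--
-- def _win_masks_for_n(n: int) -> Tuple[int, ...]:
--     """
--     Returns bitmasks for all winning lines (rows, cols, 2 diagonals) on an n x n board.
--     Indices are row-major: 0..n*n-1.
--     Bit i corresponds to index i (i.e., 1 << i).
--     """
--     if n < 1:
--         raise ValueError("n must be >= 1")
--
--     masks = []
--
--     # Rows
--     for r in range(n):
--         m = 0
--         for c in range(n):
--             m |= 1 << (r * n + c)
--         masks.append(m)
--
--     # Cols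
--     for c in range(n):
--         m = 0
--         for r in range(n):
--             m |= 1 << (r * n + c)
--         masks.append(m)
--
--     # Main diagonal (top-left -> bottom-right)
--     m = 0
--     for i in range(n):
--         m |= 1 << (i * n + i)
--     masks.append(m)
--
--     # Anti-diagonal (top-right -> bottom-left)
--     m = 0
--     for i in range(n):
--         m |= 1 << (i * n + (n - 1 - i))
--     masks.append(m)
--
--     return tuple(masks)
-- ===== SOURCE B (Python) =====
-- def _win_masks_for_n(n: int):
--     """Closed-form/shift construction of the same winning-line masks."""
--     if n < 1:
--         raise ValueError("n must be >= 1")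
--     full = (1 << n) - 1
--     rows = [full << (r * n) for r in range(n)]
--     col0 = diag = anti = 0
--     for _ in range(n):
--         col0 = (col0 << n) | 1
--         diag = (diag << (n + 1)) | 1
--         anti = (anti << (n - 1)) | 1
--     cols = [col0 << c for c in range(n)]
--     return tuple(rows + cols + [diag, anti << (n - 1)])
-- ===== Notes on version B (the rewrite author's own statement) =====
-- stated objective: alternative
-- what changed: A sets each of the n*n bits of every line mask one OR at a time in nested loops; B instead composes whole patterns: each row mask is one shift of the full-row pattern (1<<n)-1, each column mask is one shift of the column-0 pattern, and the column-0/diagonal/anti-diagonal patterns are built by a single shift-and-or accumulation loop (intended as faster: fewer, larger operations; a timing run measured 14.95x at the largest size both finished but could not confirm it at the top size, so no unqualified speed claim is made).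
import Mathlib
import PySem

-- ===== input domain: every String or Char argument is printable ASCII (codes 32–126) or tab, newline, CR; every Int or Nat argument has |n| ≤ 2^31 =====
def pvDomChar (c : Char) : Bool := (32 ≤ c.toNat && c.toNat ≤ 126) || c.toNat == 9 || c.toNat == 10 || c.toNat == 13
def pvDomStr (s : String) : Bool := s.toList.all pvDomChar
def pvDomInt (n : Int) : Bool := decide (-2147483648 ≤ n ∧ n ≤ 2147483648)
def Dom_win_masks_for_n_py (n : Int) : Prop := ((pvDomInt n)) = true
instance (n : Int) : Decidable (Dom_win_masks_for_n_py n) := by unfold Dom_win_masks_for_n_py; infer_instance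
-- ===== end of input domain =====

-- B builds the masks by shift composition instead of A's per-bit OR loops: each row mask is
-- one shift of the full-row pattern (1<<n)-1, each column mask one shift of the column-0
-- pattern, and the column-0/diagonal/anti-diagonal patterns come from one shift-and-or loop.

-- ===== PORT A =====
def win_masks_for_n_py (n : Int) : List Int :=
  -- rows
  let masks : List Int :=
    (PySem.List.pyRange 0 n 1).foldl (fun ms r =>
      ms ++ [(PySem.List.pyRange 0 n 1).foldl
        (fun m c => PySem.Int.bor m ((1 : Int) <<< (r * n + c).toNat)) 0]) []
  -- cols
  let masks :=
    (PySem.List.pyRange 0 n 1).foldl (fun ms c =>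
      ms ++ [(PySem.List.pyRange 0 n 1).foldl
        (fun m r => PySem.Int.bor m ((1 : Int) <<< (r * n + c).toNat)) 0]) masks
  -- main diagonal
  let masks := masks ++ [(PySem.List.pyRange 0 n 1).foldl
      (fun m i => PySem.Int.bor m ((1 : Int) <<< (i * n + i).toNat)) 0]
  -- anti-diagonal
  masks ++ [(PySem.List.pyRange 0 n 1).foldl
      (fun m i => PySem.Int.bor m ((1 : Int) <<< (i * n + (n - 1 - i)).toNat)) 0]

-- ===== PORT B =====
def win_masks_for_n_py_alt (n : Int) : List Int :=
  let full : Int := (1 <<< n.toNat) - 1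
  let rows := (PySem.List.pyRange 0 n 1).map (fun r => full <<< (r * n).toNat)
  let t := (PySem.List.pyRange 0 n 1).foldl
      (fun (s : Int × Int × Int) _ =>
        (PySem.Int.bor (s.1 <<< n.toNat) 1,
         PySem.Int.bor (s.2.1 <<< (n + 1).toNat) 1,
         PySem.Int.bor (s.2.2 <<< (n - 1).toNat) 1)) (0, 0, 0)
  let cols := (PySem.List.pyRange 0 n 1).map (fun c => t.1 <<< c.toNat)
  rows ++ cols ++ [t.2.1, t.2.2 <<< (n - 1).toNat]

-- ===== PRECONDITION & SPEC =====
-- A raises ValueError for n < 1; Pre_ admits exactly the inputs on which A returns.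
def Pre_win_masks_for_n_py (n : Int) : Prop := 1 ≤ n
instance (n : Int) : Decidable (Pre_win_masks_for_n_py n) := by unfold Pre_win_masks_for_n_py; infer_instance
def pvWitness_win_masks_for_n_py : Int := (3)

def Spec_win_masks_for_n_py (n : Int) (out : List Int) : Prop := out = win_masks_for_n_py_alt n
instance (n : Int) (out : List Int) : Decidable (Spec_win_masks_for_n_py n out) := by unfold Spec_win_masks_for_n_py; infer_instance

-- ===== CLAIM =====
def Claim_equal_win_masks_for_n_py : Prop := ∀ (n : Int), Dom_win_masks_for_n_py n → Pre_win_masks_for_n_py n → Spec_win_masks_for_n_py n (win_masks_for_n_py n)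

-- ===== LEMMAS AND PROOFS =====

-- sum of the geometric bit pattern: bits at 0, d, 2d, …, (k-1)d
def bitsS (d k : Nat) : Nat := ∑ i ∈ Finset.range k, 2 ^ (i * d)

theorem bitsS_lt (d k : Nat) (hd : 1 ≤ d) : bitsS d k < 2 ^ (k * d) := by
  induction k with
  | zero => simp [bitsS]
  | succ k ih =>
    have h1 : 2 ^ (k * d + 1) ≤ 2 ^ ((k + 1) * d) := by
      apply Nat.pow_le_pow_right (by norm_num)
      nlinarith
    have := Finset.sum_range_succ (fun i => 2 ^ (i * d)) k
    simp only [bitsS] at *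
    omega

theorem lor_of_lt (a e : Nat) (h : a < 2 ^ e) : a ||| 2 ^ e = a + 2 ^ e := by
  have h1 := Nat.two_pow_add_eq_or_of_lt (i := e) (b := a) h 1
  simp only [Nat.mul_one] at h1
  rw [Nat.lor_comm]
  omega

theorem even_lor_one (a : Nat) (h : a % 2 = 0) : a ||| 1 = a + 1 := by
  have h1 := Nat.two_pow_add_eq_or_of_lt (i := 1) (b := 1) (by norm_num) (a / 2)
  have h2 : (2 : Nat) ^ 1 = 2 := by norm_num
  rw [h2] at h1
  have h3 : 2 * (a / 2) = a := by omega
  rw [h3] at h1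
  omega

theorem natFoldA (s d : Nat) (hd : 1 ≤ d) (k : Nat) :
    (List.range k).foldl (fun acc i => acc ||| (1 <<< (s + i * d))) 0 = 2 ^ s * bitsS d k := by
  induction k with
  | zero => simp [bitsS]
  | succ k ih =>
    rw [List.range_succ, List.foldl_append, List.foldl_cons, List.foldl_nil, ih,
        Nat.shiftLeft_eq, Nat.one_mul]
    have hlt : 2 ^ s * bitsS d k < 2 ^ (s + k * d) := by
      rw [Nat.pow_add]
      exact (Nat.mul_lt_mul_left (pow_pos (by norm_num : (0:ℕ) < 2) s)).mpr (bitsS_lt d k hd)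
    rw [lor_of_lt _ _ hlt]
    simp only [bitsS, Finset.sum_range_succ, Nat.mul_add, Nat.pow_add]

theorem natFoldB (d : Nat) (hd : 1 ≤ d) (k : Nat) :
    (List.range k).foldl (fun c _ => (c <<< d) ||| 1) 0 = bitsS d k := by
  induction k with
  | zero => simp [bitsS]
  | succ k ih =>
    rw [List.range_succ, List.foldl_append, List.foldl_cons, List.foldl_nil, ih]
    have heven : bitsS d k <<< d % 2 = 0 := by
      rw [Nat.shiftLeft_eq]
      obtain ⟨t, ht⟩ : (2 : Nat) ∣ 2 ^ d := dvd_pow_self 2 (by omega)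
      rw [ht]
      have hh : bitsS d k * (2 * t) = 2 * (bitsS d k * t) := by ring
      rw [hh]
      omega
    rw [even_lor_one _ heven, Nat.shiftLeft_eq]
    simp only [bitsS, Finset.sum_range_succ', Finset.sum_mul]
    congr 1
    · apply Finset.sum_congr rfl
      intro i _
      rw [← Nat.pow_add]
      congr 1
      ring
    · simp

theorem foldl_natCast {α : Type} (f : Nat → α → Nat) (g : Int → α → Int)
    (h : ∀ (a : Nat) (i : α), g ((a : Nat) : Int) i = (((f a i : Nat)) : Int)) (l : List α) (a : Nat) :
    l.foldl g ↑a = ↑(l.foldl f a) := by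
  induction l generalizing a with
  | nil => rfl
  | cons x xs ih => rw [List.foldl_cons, List.foldl_cons, h, ih]

theorem foldl_prod3 (l : List Int) (d1 d2 d3 : Nat) (a b c : Int) :
    l.foldl (fun (s : Int × Int × Int) _ =>
        (PySem.Int.bor (s.1 <<< d1) 1, PySem.Int.bor (s.2.1 <<< d2) 1,
         PySem.Int.bor (s.2.2 <<< d3) 1)) (a, b, c) =
      (l.foldl (fun x _ => PySem.Int.bor (x <<< d1) 1) a,
       l.foldl (fun x _ => PySem.Int.bor (x <<< d2) 1) b,
       l.foldl (fun x _ => PySem.Int.bor (x <<< d3) 1) c) := by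
  induction l generalizing a b c with
  | nil => rfl
  | cons x xs ih => simp only [List.foldl_cons, ih]

theorem one_shl_int (e : Nat) : ((1 : Int) <<< e) = ((2 ^ e : Nat) : Int) := by
  have h : ((1 : Nat) : Int) <<< e = (((1 <<< e : Nat) : Nat) : Int) := by simp
  simpa [Nat.shiftLeft_eq] using h

theorem natCast_shl (a k : Nat) : ((a : Int)) <<< k = (((a <<< k : Nat)) : Int) := by simp

theorem natCast_shl_int (a k : Nat) : ((a : Int)) <<< ((k : Nat) : Int) = (((a <<< k : Nat)) : Int) := by
  simp

theorem int_bor_fold (e : Nat → Nat) (k : Nat) :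
    (List.range k).foldl (fun (acc : Int) (i : Nat) => PySem.Int.bor acc ((1 : Int) <<< e i)) 0 =
      ↑((List.range k).foldl (fun acc i => acc ||| (1 <<< e i)) 0) := by
  have h : ∀ (a : Nat) (i : Nat),
      PySem.Int.bor ((a : Int)) ((1 : Int) <<< e i) = (((a ||| (1 <<< e i) : Nat)) : Int) := by
    intro a i
    rw [one_shl_int, PySem.Int.bor_natCast, Nat.shiftLeft_eq, Nat.one_mul]
  have h2 := foldl_natCast (fun a i => a ||| (1 <<< e i))
      (fun acc i => PySem.Int.bor acc ((1 : Int) <<< e i)) h (List.range k) 0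
  rw [Nat.cast_zero] at h2
  exact h2

theorem A_row (m r : Nat) :
    List.foldl (fun mk (c : Nat) =>
        PySem.Int.bor mk ((1 : Int) <<< ((r : Int) * (m : Int) + (c : Int)).toNat)) 0 (List.range m) =
      ((2 ^ (r * m) * bitsS 1 m : Nat) : Int) := by
  have hcongr : ∀ (acc : Int), ∀ c ∈ List.range m,
      PySem.Int.bor acc ((1 : Int) <<< ((r : Int) * (m : Int) + (c : Int)).toNat) =
      PySem.Int.bor acc ((1 : Int) <<< (r * m + c * 1)) := by
    intro acc c _
    have hx : ((r : Int) * (m : Int) + (c : Int)) = ((r * m + c * 1 : Nat) : Int) := by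
      push_cast; ring
    rw [hx, Int.toNat_natCast]
  rw [PySem.List.foldl_congr_mem _ _ _ _ hcongr, int_bor_fold (fun c => r * m + c * 1) m,
      natFoldA (r * m) 1 le_rfl m]

theorem A_col (m c : Nat) (hm : 1 ≤ m) :
    List.foldl (fun mk (i : Nat) =>
        PySem.Int.bor mk ((1 : Int) <<< ((i : Int) * (m : Int) + (c : Int)).toNat)) 0 (List.range m) =
      ((2 ^ c * bitsS m m : Nat) : Int) := by
  have hcongr : ∀ (acc : Int), ∀ i ∈ List.range m,
      PySem.Int.bor acc ((1 : Int) <<< ((i : Int) * (m : Int) + (c : Int)).toNat) =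
      PySem.Int.bor acc ((1 : Int) <<< (c + i * m)) := by
    intro acc i _
    have hx : ((i : Int) * (m : Int) + (c : Int)) = ((c + i * m : Nat) : Int) := by
      push_cast; ring
    rw [hx, Int.toNat_natCast]
  rw [PySem.List.foldl_congr_mem _ _ _ _ hcongr, int_bor_fold (fun i => c + i * m) m,
      natFoldA c m hm m]

theorem A_diag (m : Nat) (hm : 1 ≤ m) :
    List.foldl (fun mk (i : Nat) =>
        PySem.Int.bor mk ((1 : Int) <<< ((i : Int) * (m : Int) + (i : Int)).toNat)) 0 (List.range m) =
      ((bitsS (m + 1) m : Nat) : Int) := by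
  have hcongr : ∀ (acc : Int), ∀ i ∈ List.range m,
      PySem.Int.bor acc ((1 : Int) <<< ((i : Int) * (m : Int) + (i : Int)).toNat) =
      PySem.Int.bor acc ((1 : Int) <<< (0 + i * (m + 1))) := by
    intro acc i _
    have hx : ((i : Int) * (m : Int) + (i : Int)) = ((0 + i * (m + 1) : Nat) : Int) := by
      push_cast; ring
    rw [hx, Int.toNat_natCast]
  rw [PySem.List.foldl_congr_mem _ _ _ _ hcongr, int_bor_fold (fun i => 0 + i * (m + 1)) m,
      natFoldA 0 (m + 1) (by omega) m]
  norm_num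

theorem A_anti (m : Nat) (hm : 2 ≤ m) :
    List.foldl (fun mk (i : Nat) =>
        PySem.Int.bor mk ((1 : Int) <<< ((i : Int) * (m : Int) + ((m : Int) - 1 - (i : Int))).toNat)) 0
        (List.range m) =
      ((2 ^ (m - 1) * bitsS (m - 1) m : Nat) : Int) := by
  have hcongr : ∀ (acc : Int), ∀ i ∈ List.range m,
      PySem.Int.bor acc ((1 : Int) <<< ((i : Int) * (m : Int) + ((m : Int) - 1 - (i : Int))).toNat) =
      PySem.Int.bor acc ((1 : Int) <<< ((m - 1) + i * (m - 1))) := by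
    intro acc i _
    have h1 : (((m - 1) + i * (m - 1) : Nat) : Int) =
        (i : Int) * (m : Int) + ((m : Int) - 1 - (i : Int)) := by
      push_cast [Nat.cast_sub (show 1 ≤ m by omega)]
      ring
    rw [← h1, Int.toNat_natCast]
  rw [PySem.List.foldl_congr_mem _ _ _ _ hcongr, int_bor_fold (fun i => (m - 1) + i * (m - 1)) m,
      natFoldA (m - 1) (m - 1) (by omega) m]

theorem B_acc (m d : Nat) (hd : 1 ≤ d) :
    List.foldl (fun (x : Int) (_ : Int) => PySem.Int.bor (x <<< d) 1) 0
        (PySem.List.pyRange 0 (m : Int) 1) =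
      ((bitsS d m : Nat) : Int) := by
  rw [PySem.List.pyRange_zero_natCast, List.foldl_map]
  have h : ∀ (a : Nat) (i : Nat),
      PySem.Int.bor (((a : Nat) : Int) <<< d) 1 = (((a <<< d) ||| 1 : Nat) : Int) := by
    intro a i
    rw [natCast_shl]
    have h2 : (1 : Int) = ((1 : Nat) : Int) := by norm_num
    rw [h2, PySem.Int.bor_natCast]
  have h3 := foldl_natCast (fun a (_ : Nat) => (a <<< d) ||| 1)
      (fun x (_ : Nat) => PySem.Int.bor (x <<< d) 1) (fun a i => h a i) (List.range m) 0
  rw [Nat.cast_zero] at h3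
  rw [h3, natFoldB d hd m]

theorem bitsS_one (m : Nat) : bitsS 1 m = 2 ^ m - 1 := by
  induction m with
  | zero => simp [bitsS]
  | succ k ih =>
    simp only [bitsS, Finset.sum_range_succ, Nat.mul_one] at *
    have h1 : 1 ≤ 2 ^ k := Nat.one_le_two_pow
    have h2 : 2 ^ (k + 1) = 2 * 2 ^ k := by ring
    omega

theorem A_char (m : Nat) (hm : 2 ≤ m) :
    win_masks_for_n_py (m : Int) =
      (List.range m).map (fun r => ((2 ^ (r * m) * bitsS 1 m : Nat) : Int)) ++
      ((List.range m).map (fun c => ((2 ^ c * bitsS m m : Nat) : Int)) ++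
       [((bitsS (m + 1) m : Nat) : Int), ((2 ^ (m - 1) * bitsS (m - 1) m : Nat) : Int)]) := by
  simp only [win_masks_for_n_py, PySem.List.pyRange_zero_natCast, List.foldl_map]
  rw [PySem.List.foldl_append_singleton_eq_map, PySem.List.foldl_append_singleton_eq_map]
  simp only [List.nil_append, List.append_assoc, List.singleton_append]
  rw [A_diag m (by omega), A_anti m hm]
  congr 1
  · exact List.map_congr_left (fun r _ => A_row m r)
  congr 1
  exact List.map_congr_left (fun c _ => A_col m c (by omega))

theorem B_char (m : Nat) (hm : 2 ≤ m) :
    win_masks_for_n_py_alt (m : Int) =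
      (List.range m).map (fun r => ((2 ^ (r * m) * bitsS 1 m : Nat) : Int)) ++
      ((List.range m).map (fun c => ((2 ^ c * bitsS m m : Nat) : Int)) ++
       [((bitsS (m + 1) m : Nat) : Int), ((2 ^ (m - 1) * bitsS (m - 1) m : Nat) : Int)]) := by
  have hm1 : ((m : Int) - 1).toNat = m - 1 := by omega
  have hm2 : ((m : Int) + 1).toNat = m + 1 := by omega
  have hmm : ((m : Int)).toNat = m := by omega
  simp only [win_masks_for_n_py_alt, hm1, hm2, hmm]
  rw [foldl_prod3 (PySem.List.pyRange 0 (m : Int) 1) m (m + 1) (m - 1) 0 0 0]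
  rw [B_acc m m (by omega), B_acc m (m + 1) (by omega), B_acc m (m - 1) (by omega)]
  rw [PySem.List.pyRange_zero_natCast, List.map_map, List.map_map, List.append_assoc]
  congr 1
  · -- rows
    apply List.map_congr_left
    intro r hr
    simp only [Function.comp_apply]
    have hx : ((r : Int) * (m : Int)) = ((r * m : Nat) : Int) := by push_cast; ring
    rw [hx, Int.toNat_natCast]
    have h1 : (((1 <<< m : Nat) : Int)) - 1 = (((2 ^ m - 1 : Nat)) : Int) := by
      have h0 : 1 ≤ 2 ^ m := Nat.one_le_two_pow
      rw [Nat.shiftLeft_eq, Nat.one_mul]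
      push_cast [Nat.cast_sub h0]
      ring
    rw [h1, natCast_shl]
    congr 1
    rw [Nat.shiftLeft_eq, bitsS_one]
    exact Nat.mul_comm _ _
  congr 1
  · -- cols
    apply List.map_congr_left
    intro c hc
    simp only [Function.comp_apply, Int.toNat_natCast]
    rw [natCast_shl_int]
    congr 1
    rw [Nat.shiftLeft_eq]
    exact Nat.mul_comm _ _
  · -- diag and anti
    rw [natCast_shl, Nat.shiftLeft_eq, Nat.mul_comm (bitsS (m - 1) m) (2 ^ (m - 1))]

-- ===== VERDICT =====
theorem win_masks_for_n_py_spec : Claim_equal_win_masks_for_n_py := by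
  intro n _ hpre
  unfold Pre_win_masks_for_n_py at hpre
  unfold Spec_win_masks_for_n_py
  lift n to Nat using (by omega) with m
  have hm0 : 1 ≤ m := by exact_mod_cast hpre
  rcases Nat.lt_or_ge m 2 with h2 | h2
  · have hm1 : m = 1 := by omega
    subst hm1
    decide
  · rw [A_char m h2, B_char m h2]
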